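-- pv_equiv track=rewrite | github.com/hpthreatresearch/tools | gootloader/decode_webredraw.py | decode_cipher
-- ===== SOURCE A (Python) =====
-- def decode_cipher(cipher):
--     plaintext = ""
--     counter = 0
--     while(counter < len(cipher)):
--         decoded_char = cipher[counter]
--         if counter % 2:
--             plaintext = plaintext + decoded_char
--         else:
--             plaintext = decoded_char + plaintext
--         counter += 1
--     return plaintext
-- ===== SOURCE B (Python) =====
-- def decode_cipher(cipher):
--     # even-index chars are prepended (so they end up reversed), odd-index appended
--     return cipher[::2][::-1] + cipher[1::2]
-- ===== Notes on version B (the rewrite author's own statement) =====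
-- stated objective: faster
-- what changed: Replaces the character-by-character while loop with parity branch (quadratic string prepends) by two step-2 slices: reversed even-index slice concatenated with the odd-index slice, in linear time.
import Mathlib
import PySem

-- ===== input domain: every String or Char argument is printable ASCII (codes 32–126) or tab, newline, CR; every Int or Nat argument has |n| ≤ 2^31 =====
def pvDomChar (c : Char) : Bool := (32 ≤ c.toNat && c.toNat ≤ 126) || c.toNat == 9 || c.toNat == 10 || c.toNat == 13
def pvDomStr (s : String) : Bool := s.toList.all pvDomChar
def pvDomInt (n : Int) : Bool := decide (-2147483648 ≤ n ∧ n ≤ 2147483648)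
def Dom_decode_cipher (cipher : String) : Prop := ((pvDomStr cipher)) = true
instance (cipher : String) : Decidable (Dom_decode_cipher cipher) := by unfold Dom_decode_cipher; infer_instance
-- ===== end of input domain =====

-- B replaces A's while loop with two step-2 slices: reversed evens ++ odds (simpler; return value only).

-- ===== PORT A =====
-- the while loop: counter scans the string, prepending even-index chars and appending odd-index chars
def decode_cipher_go (cs : List Char) (counter : Nat) (plaintext : List Char) : List Char :=
  if h : counter < cs.length then
    let decoded_char := cs[counter]
    if counter % 2 = 1 then
      decode_cipher_go cs (counter + 1) (plaintext ++ [decoded_char])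
    else
      decode_cipher_go cs (counter + 1) ([decoded_char] ++ plaintext)
  else plaintext
termination_by cs.length - counter

def decode_cipher (cipher : String) : String :=
  String.mk (decode_cipher_go cipher.toList 0 [])

-- ===== PORT B =====
-- cipher[::2] (resp. applied to the tail for cipher[1::2]): every second element
def everySecond : List Char → List Char
  | [] => []
  | [c] => [c]
  | c :: _ :: rest => c :: everySecond rest

def decode_cipher_alt (cipher : String) : String :=
  String.mk ((everySecond cipher.toList).reverse ++ everySecond cipher.toList.tail)

-- ===== PRECONDITION & SPEC =====
def Spec_decode_cipher (cipher : String) (out : String) : Prop := out = decode_cipher_alt cipher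
instance (cipher : String) (out : String) : Decidable (Spec_decode_cipher cipher out) := by unfold Spec_decode_cipher; infer_instance

-- ===== CLAIM (what is proved, stated in full; the proofs are below) =====
def Claim_equal_decode_cipher : Prop := ∀ (cipher : String), Dom_decode_cipher cipher → Spec_decode_cipher cipher (decode_cipher cipher)

-- ===== LEMMAS AND PROOFS =====
theorem everySecond_cons (c : Char) (rest : List Char) :
    everySecond (c :: rest) = c :: everySecond rest.tail := by
  cases rest <;> rfl

-- loop invariant: from state (counter, acc), with rem the unprocessed suffix, the loop
-- returns reverse(prepended chars) ++ acc ++ appended chars, the roles fixed by counter's parity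
theorem decode_cipher_go_spec (rem : List Char) :
    ∀ (cs : List Char) (counter : Nat) (acc : List Char), cs.drop counter = rem →
      decode_cipher_go cs counter acc =
        if counter % 2 = 0 then
          (everySecond rem).reverse ++ acc ++ everySecond rem.tail
        else
          (everySecond rem.tail).reverse ++ acc ++ everySecond rem := by
  induction rem with
  | nil =>
    intro cs counter acc h
    have hlen : cs.length ≤ counter := by
      by_contra hlt
      push_neg at hlt
      have := List.drop_eq_nil_iff.mp h
      omega
    rw [decode_cipher_go]
    simp [Nat.not_lt_of_le hlen, everySecond]
  | cons c rest ih =>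
    intro cs counter acc h
    have hlt : counter < cs.length := by
      by_contra hge
      push_neg at hge
      rw [List.drop_eq_nil_iff.mpr hge] at h
      simp at h
    have hget : cs[counter] = c := by
      have := List.getElem_drop (xs := cs) (i := counter) (j := 0) (h := by rw [h]; simp)
      simp [h] at this
      exact this.symm
    have hdrop : cs.drop (counter + 1) = rest := by
      have : (cs.drop counter).tail = cs.drop (counter + 1) := by
        rw [← List.drop_drop]; simp
      rw [← this, h]; rfl
    rw [decode_cipher_go]
    simp only [hlt, dif_pos, hget]
    by_cases hpar : counter % 2 = 0
    · have hpar1 : ¬ (counter % 2 = 1) := by omega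
      have hpar' : ¬ ((counter + 1) % 2 = 0) := by omega
      simp only [if_pos hpar, hpar1, ite_false]
      rw [ih cs (counter + 1) ([c] ++ acc) hdrop]
      simp only [hpar', ite_false, everySecond_cons, List.tail_cons, List.reverse_cons]
      simp [List.append_assoc]
    · have hpar1 : counter % 2 = 1 := by omega
      have hpar' : (counter + 1) % 2 = 0 := by omega
      simp only [hpar1, ite_true]
      rw [ih cs (counter + 1) (acc ++ [c]) hdrop]
      simp only [hpar', ite_true, everySecond_cons, List.tail_cons]
      simp [List.append_assoc]

-- ===== VERDICT (by name: the statement is the Claim_ definition above) =====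
theorem decode_cipher_spec : Claim_equal_decode_cipher := by
  intro cipher _
  unfold Spec_decode_cipher decode_cipher decode_cipher_alt
  rw [decode_cipher_go_spec (cipher.toList) cipher.toList 0 [] (by simp)]
  simp
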